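-- pv_equiv track=rewrite | github.com/Parveen-Birthaliya/DocuAI | src/dedup/merge_knowledge.py | merge_code
-- ===== SOURCE A (Python) =====
-- from typing import Dict, List, Set, Tuple, Optional
--
-- def merge_code(code_list: List[List[Dict]]) -> List[Dict]:
--     """Merge code blocks deduplicating"""
--     merged = {}
--
--     for code_blocks in code_list:
--         for code in code_blocks:
--             # Use code content as key
--             code_text = code.get("code", "").strip()
--
--             if code_text not in merged:
--                 merged[code_text] = code
--             else:
--                 # Keep most informative version
--                 if len(code.get("language", "")) > len(merged[code_text].get("language", "")):
--                     merged[code_text] = code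
--
--     return list(merged.values())
-- ===== SOURCE B (Python) =====
-- def merge_code(code_list):
--     """Merge code blocks deduplicating"""
--     groups = {}
--     for code_blocks in code_list:
--         for code in code_blocks:
--             groups.setdefault(code.get("code", "").strip(), []).append(code)
--     return [max(group, key=lambda c: len(c.get("language", "")))
--             for group in groups.values()]
-- ===== Notes on version B (the rewrite author's own statement) =====
-- stated objective: simpler
-- what changed: A keeps a single running 'best so far' entry per code text and decides on each element whether to replace it; B first accumulates all blocks into per-code-text group lists (setdefault/append) and then, in a separate reduction pass, takes max(group, key=len(language)) of each group.
import Mathlib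
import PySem

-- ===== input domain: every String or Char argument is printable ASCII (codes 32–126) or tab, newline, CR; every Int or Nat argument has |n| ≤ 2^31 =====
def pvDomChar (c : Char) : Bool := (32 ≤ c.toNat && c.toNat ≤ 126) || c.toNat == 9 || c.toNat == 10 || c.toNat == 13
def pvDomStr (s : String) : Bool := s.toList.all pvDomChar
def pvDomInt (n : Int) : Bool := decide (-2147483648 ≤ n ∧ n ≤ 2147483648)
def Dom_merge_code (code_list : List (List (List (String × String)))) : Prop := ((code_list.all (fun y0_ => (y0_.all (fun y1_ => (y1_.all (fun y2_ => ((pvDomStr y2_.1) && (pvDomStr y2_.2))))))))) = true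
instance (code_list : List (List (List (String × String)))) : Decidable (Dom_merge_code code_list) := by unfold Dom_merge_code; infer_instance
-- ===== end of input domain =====

-- B replaces A's online "keep running best per key" update with an accumulate-all-groups-then-reduce
-- decomposition (group lists per code text, then take the first language-longest element of each group); simpler, same cost.

-- shared helper: Python's dict.get(k, dflt) on an item dict (association list, first match)
def dget (d : List (String × String)) (k dflt : String) : String :=
  match d.find? (fun p => p.1 == k) with
  | some p => p.2
  | none => dflt

-- len(c.get("language", ""))
def langLen (c : List (String × String)) : Int := PySem.Str.len (dget c "language" "")

-- ===== PORT A =====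
def merge_code (code_list : List (List (List (String × String)))) : List (List (String × String)) :=
  let merged : PySem.Dict String (List (String × String)) :=
    code_list.foldl (fun merged code_blocks =>
      code_blocks.foldl (fun merged code =>
        let code_text := PySem.Str.strip (dget code "code" "")
        if merged.contains code_text = false then
          merged.insert code_text code
        else
          if langLen code > langLen (merged.getD code_text []) then
            merged.insert code_text code
          else
            merged) merged) PySem.Dict.empty
  merged.values

-- ===== PORT B =====
def merge_code_alt (code_list : List (List (List (String × String)))) : List (List (String × String)) :=
  let groups : PySem.Dict String (List (List (String × String))) :=
    code_list.foldl (fun groups code_blocks =>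
      code_blocks.foldl (fun groups code =>
        groups.modify (PySem.Str.strip (dget code "code" "")) [] (fun g => g ++ [code])) groups)
      PySem.Dict.empty
  groups.values.map (fun group => PySem.List.maxD group langLen [])

-- ===== PRECONDITION & SPEC =====
def Spec_merge_code (code_list : List (List (List (String × String)))) (out : List (List (String × String))) : Prop := out = merge_code_alt code_list
instance (code_list : List (List (List (String × String)))) (out : List (List (String × String))) : Decidable (Spec_merge_code code_list out) := by unfold Spec_merge_code; infer_instance

-- ===== CLAIM (what is proved, stated in full; the proofs are below) =====
def Claim_equal_merge_code : Prop := ∀ (code_list : List (List (List (String × String)))), Dom_merge_code code_list → Spec_merge_code code_list (merge_code code_list)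

-- ===== LEMMAS AND PROOFS =====

-- the loop bodies of the two ports, named for the proofs
def stepA (merged : PySem.Dict String (List (String × String))) (code : List (String × String)) :
    PySem.Dict String (List (String × String)) :=
  let code_text := PySem.Str.strip (dget code "code" "")
  if merged.contains code_text = false then
    merged.insert code_text code
  else
    if langLen code > langLen (merged.getD code_text []) then
      merged.insert code_text code
    else
      merged

def stepB (groups : PySem.Dict String (List (List (String × String)))) (code : List (String × String)) :
    PySem.Dict String (List (List (String × String))) :=
  groups.modify (PySem.Str.strip (dget code "code" "")) [] (fun g => g ++ [code])

-- first element of g with the longest language field (Python max(g, key=...))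
def bestOf (g : List (List (String × String))) : List (String × String) :=
  PySem.List.maxD g langLen []

def fitem (p : String × List (List (String × String))) : String × List (String × String) :=
  (p.1, bestOf p.2)

-- the invariant relating A's dict to B's groups dict
def InvAB (dA : PySem.Dict String (List (String × String)))
    (dB : PySem.Dict String (List (List (String × String)))) : Prop :=
  dA = PySem.Dict.mk (dB.items.map fitem) ∧ dB.keys.Nodup ∧ ∀ p ∈ dB.items, p.2 ≠ []

lemma inv_get? {dA : PySem.Dict String (List (String × String))} {dB : PySem.Dict String (List (List (String × String)))} (h : InvAB dA dB) (k : String) :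
    dA.get? k = (dB.get? k).map bestOf := by
  obtain ⟨h1, -, -⟩ := h
  subst h1
  simp [PySem.Dict.get?, List.find?_map, Function.comp_def, fitem]

lemma inv_contains {dA : PySem.Dict String (List (String × String))} {dB : PySem.Dict String (List (List (String × String)))} (h : InvAB dA dB) (k : String) :
    dA.contains k = dB.contains k := by
  rw [PySem.Dict.contains_eq_isSome_get?, PySem.Dict.contains_eq_isSome_get?, inv_get? h]
  cases dB.get? k <;> rfl

lemma bestOf_append (g : List (List (String × String))) (hg : g ≠ []) (x : List (String × String)) :
    bestOf (g ++ [x]) = if langLen (bestOf g) < langLen x then x else bestOf g := by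
  obtain ⟨m, hm⟩ : ∃ m, PySem.List.max? g langLen = some m := by
    cases h : PySem.List.max? g langLen with
    | none => exact absurd ((PySem.List.max?_eq_none_iff g langLen).mp h) hg
    | some m => exact ⟨m, rfl⟩
  have hb : bestOf g = m := by simp [bestOf, PySem.List.maxD, hm]
  simp only [bestOf, PySem.List.maxD, PySem.List.max?, List.foldl_append] at *
  rw [hm] at *
  simp [hb]
  split <;> rfl

lemma inv_step {dA : PySem.Dict String (List (String × String))} {dB : PySem.Dict String (List (List (String × String)))} (h : InvAB dA dB) (x : List (String × String)) :
    InvAB (stepA dA x) (stepB dB x) := by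
  obtain ⟨h1, h2, h3⟩ := h
  set k := PySem.Str.strip (dget x "code" "") with hk
  have hitems : dA.items = dB.items.map fitem := by rw [h1]
  by_cases hc : dB.contains k = true
  · -- key already present: B appends to the group, A keeps/replaces the best
    obtain ⟨g, hg⟩ : ∃ g, dB.get? k = some g := by
      have := PySem.Dict.contains_eq_isSome_get? dB k
      rw [hc] at this
      cases hgg : dB.get? k with
      | none => rw [hgg] at this; simp at this
      | some g => exact ⟨g, rfl⟩
    have hgmem : (k, g) ∈ dB.items := PySem.Dict.mem_items_of_get?_eq_some dB hg
    have hgne : g ≠ [] := h3 _ hgmem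
    have hgetA : dA.getD k [] = bestOf g := by
      simp [PySem.Dict.getD, inv_get? ⟨h1, h2, h3⟩, hg]
    have hB : stepB dB x = dB.insert k (g ++ [x]) := by
      simp [stepB, ← hk, PySem.Dict.modify, PySem.Dict.getD, hg]
    have hcA : dA.contains k = true := by rw [inv_contains ⟨h1, h2, h3⟩]; exact hc
    have hitemsB : (dB.insert k (g ++ [x])).items
        = dB.items.map (fun p => if p.1 == k then (k, g ++ [x]) else p) :=
      PySem.Dict.items_insert_of_contains dB _ hc
    have hmain : stepA dA x = PySem.Dict.mk ((stepB dB x).items.map fitem) := by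
      have hA : stepA dA x
          = if langLen x > langLen (bestOf g) then dA.insert k x else dA := by
        simp [stepA, ← hk, hcA, hgetA]
      rw [hB, hA]
      apply PySem.Dict.ext
      rw [hitemsB, List.map_map]
      by_cases hlt : langLen x > langLen (bestOf g)
      · rw [if_pos hlt, PySem.Dict.items_insert_of_contains dA _ hcA, hitems, List.map_map]
        apply List.map_congr_left
        intro p hp
        simp only [Function.comp_def, fitem]
        by_cases hpk : p.1 == k
        · simp [hpk, bestOf_append g hgne x, hlt]
        · simp [hpk]
      · rw [if_neg hlt, hitems]
        apply List.map_congr_left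
        intro p hp
        simp only [Function.comp_def, fitem]
        by_cases hpk : p.1 == k
        · have hpk' : p.1 = k := by exact eq_of_beq hpk
          have hpg : p.2 = g := by
            have := PySem.Dict.get?_of_mem_items dB (k := p.1) (v := p.2) hp h2
            rw [hpk', hg] at this
            exact Option.some.inj this.symm
          simp [hpk', hpg, bestOf_append g hgne x, hlt]
        · simp [hpk]
    refine ⟨hmain, ?_, ?_⟩
    · rw [hB]; exact PySem.Dict.nodup_keys_insert _ _ _ h2
    · rw [hB, hitemsB]
      intro p hp
      simp only [List.mem_map] at hp
      obtain ⟨q, hq, hqe⟩ := hp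
      by_cases hqk : q.1 == k
      · rw [if_pos hqk] at hqe; rw [← hqe]; simp
      · rw [if_neg hqk] at hqe; rw [← hqe]; exact h3 _ hq
  · -- fresh key: both append a new entry
    have hc' : dB.contains k = false := by simpa using hc
    have hcA : dA.contains k = false := by rw [inv_contains ⟨h1, h2, h3⟩]; exact hc'
    have hB : stepB dB x = dB.insert k [x] := by
      simp [stepB, ← hk, PySem.Dict.modify, PySem.Dict.getD_of_not_contains dB _ hc']
    have hA : stepA dA x = dA.insert k x := by simp [stepA, ← hk, hcA]
    have hitemsB : (dB.insert k [x]).items = dB.items ++ [(k, [x])] :=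
      PySem.Dict.items_insert_of_not_contains dB _ hc'
    refine ⟨?_, ?_, ?_⟩
    · rw [hA, hB]
      apply PySem.Dict.ext
      rw [PySem.Dict.items_insert_of_not_contains dA _ hcA, hitemsB, List.map_append, hitems]
      rfl
    · rw [hB]; exact PySem.Dict.nodup_keys_insert _ _ _ h2
    · rw [hB, hitemsB]
      intro p hp
      rcases List.mem_append.mp hp with hp | hp
      · exact h3 _ hp
      · simp only [List.mem_singleton] at hp; rw [hp]; simp
  
lemma inv_foldl (l : List (List (String × String))) {dA : PySem.Dict String (List (String × String))} {dB : PySem.Dict String (List (List (String × String)))} (h : InvAB dA dB) :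
    InvAB (l.foldl stepA dA) (l.foldl stepB dB) := by
  induction l generalizing dA dB with
  | nil => exact h
  | cons x t ih => exact ih (inv_step h x)

lemma merge_code_eq_flat (code_list : List (List (List (String × String)))) :
    merge_code code_list = (code_list.flatten.foldl stepA PySem.Dict.empty).values := by
  unfold merge_code stepA
  rw [List.foldl_flatten]

lemma merge_code_alt_eq_flat (code_list : List (List (List (String × String)))) :
    merge_code_alt code_list
      = (code_list.flatten.foldl stepB PySem.Dict.empty).values.map bestOf := by
  unfold merge_code_alt stepB bestOf
  rw [List.foldl_flatten]

-- ===== VERDICT (by name: the statement is the Claim_ definition above) =====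
theorem merge_code_spec : Claim_equal_merge_code := by
  unfold Claim_equal_merge_code Spec_merge_code
  intro code_list _
  rw [merge_code_eq_flat, merge_code_alt_eq_flat]
  have hinv : InvAB (code_list.flatten.foldl stepA PySem.Dict.empty)
      (code_list.flatten.foldl stepB PySem.Dict.empty) := by
    apply inv_foldl
    exact ⟨rfl, by simp [PySem.Dict.empty, PySem.Dict.keys], by simp [PySem.Dict.empty]⟩
  obtain ⟨h1, -, -⟩ := hinv
  rw [h1]
  simp [PySem.Dict.values, List.map_map, fitem, Function.comp_def]
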